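-- pv_equiv track=rewrite | github.com/MichaelBeehler/BrainLearning | test.py | find_label_keys
-- ===== SOURCE A (Python) =====
-- def find_label_keys(map_dict):
--     keys = list(map_dict.keys())
--     hands_key = None
--     feet_key = None
--     for k in keys:
--         kl = k.lower()
--         if 'hand' in kl or 'hands' in kl or 'left' in kl:
--             hands_key = k
--         if 'foot' in kl or 'feet' in kl or 'right' in kl:
--             feet_key = k
--     # fallback to T1/T2
--     if hands_key is None and 't1' in [k.lower() for k in keys]:
--         for k in keys:
--             if k.lower() == 't1':
--                 hands_key = k
--     if feet_key is None and 't2' in [k.lower() for k in keys]: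
--         for k in keys:
--             if k.lower() == 't2':
--                 feet_key = k
--     return hands_key, feet_key
-- ===== SOURCE B (Python) =====
-- def find_label_keys(map_dict):
--     hands_key = None
--     feet_key = None
--     t1_key = None
--     t2_key = None
--     for k in map_dict:
--         kl = k.lower()
--         if 'hand' in kl or 'left' in kl:
--             hands_key = k
--         if 'foot' in kl or 'feet' in kl or 'right' in kl:
--             feet_key = k
--         if kl == 't1':
--             t1_key = k
--         if kl == 't2':
--             t2_key = k
--     return (hands_key if hands_key is not None else t1_key,
--             feet_key if feet_key is not None else t2_key)
-- ===== Notes on version B (the rewrite author's own statement) =====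
-- stated objective: simpler
-- what changed: A's main key pass plus two membership tests and two fallback re-scans are collapsed into a single pass that tracks four last-seen keys (hand/foot match and exact 't1'/'t2'), with the fallback reduced to an is-not-None choice; the redundant "'hands' in kl" test (implied by "'hand' in kl") is dropped.
import Mathlib
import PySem

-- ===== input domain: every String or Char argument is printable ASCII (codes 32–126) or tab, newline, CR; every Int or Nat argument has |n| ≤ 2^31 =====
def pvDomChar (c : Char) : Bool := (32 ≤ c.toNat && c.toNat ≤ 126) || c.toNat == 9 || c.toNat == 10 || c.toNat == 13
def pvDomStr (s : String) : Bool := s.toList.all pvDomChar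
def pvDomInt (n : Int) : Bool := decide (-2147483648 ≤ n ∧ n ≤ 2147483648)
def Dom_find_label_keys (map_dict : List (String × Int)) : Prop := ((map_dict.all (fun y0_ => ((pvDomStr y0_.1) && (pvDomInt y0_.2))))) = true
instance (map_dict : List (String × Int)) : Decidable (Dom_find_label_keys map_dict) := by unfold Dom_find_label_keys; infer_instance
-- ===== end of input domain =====

-- One-line: B replaces A's main pass + two fallback re-scans by a single pass tracking four last-seen keys (simpler; same result).

-- ===== PORT A =====
def find_label_keys (map_dict : List (String × Int)) : Option String × Option String :=
  let keys := (PySem.Dict.ofList map_dict).keys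
  let st := keys.foldl (fun (st : Option String × Option String) k =>
      let kl := PySem.Str.lower k
      let st1 := if PySem.Str.isIn "hand" kl || PySem.Str.isIn "hands" kl || PySem.Str.isIn "left" kl
                 then (some k, st.2) else st
      if PySem.Str.isIn "foot" kl || PySem.Str.isIn "feet" kl || PySem.Str.isIn "right" kl
      then (st1.1, some k) else st1) (none, none)
  let hands_key :=
    if st.1 = none ∧ "t1" ∈ keys.map (fun k => PySem.Str.lower k) then
      keys.foldl (fun h k => if PySem.Str.lower k == "t1" then some k else h) st.1
    else st.1
  let feet_key :=
    if st.2 = none ∧ "t2" ∈ keys.map (fun k => PySem.Str.lower k) then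
      keys.foldl (fun f k => if PySem.Str.lower k == "t2" then some k else f) st.2
    else st.2
  (hands_key, feet_key)

-- ===== PORT B =====
def find_label_keys_alt (map_dict : List (String × Int)) : Option String × Option String :=
  let st := ((PySem.Dict.ofList map_dict).keys).foldl
    (fun (st : Option String × Option String × Option String × Option String) k =>
      let kl := PySem.Str.lower k
      let st := if PySem.Str.isIn "hand" kl || PySem.Str.isIn "left" kl
                then (some k, st.2) else st
      let st := if PySem.Str.isIn "foot" kl || PySem.Str.isIn "feet" kl || PySem.Str.isIn "right" kl
                then (st.1, some k, st.2.2) else st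
      let st := if kl == "t1" then (st.1, st.2.1, some k, st.2.2.2) else st
      if kl == "t2" then (st.1, st.2.1, st.2.2.1, some k) else st)
    (none, none, none, none)
  (if st.1.isSome then st.1 else st.2.2.1,
   if st.2.1.isSome then st.2.1 else st.2.2.2)

-- ===== PRECONDITION & SPEC =====
def Spec_find_label_keys (map_dict : List (String × Int)) (out : Option String × Option String) : Prop := out = find_label_keys_alt map_dict
instance (map_dict : List (String × Int)) (out : Option String × Option String) : Decidable (Spec_find_label_keys map_dict out) := by unfold Spec_find_label_keys; infer_instance

-- ===== CLAIM (what is proved, stated in full; the proofs are below) =====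
def Claim_equal_find_label_keys : Prop := ∀ (map_dict : List (String × Int)), Dom_find_label_keys map_dict → Spec_find_label_keys map_dict (find_label_keys map_dict)

-- ===== LEMMAS AND PROOFS =====

-- last key satisfying p, as a foldl
def updLast (p : String → Bool) (h : Option String) (keys : List String) : Option String :=
  keys.foldl (fun h k => if p k then some k else h) h

def pHandA (k : String) : Bool :=
  PySem.Str.isIn "hand" (PySem.Str.lower k) || PySem.Str.isIn "hands" (PySem.Str.lower k) || PySem.Str.isIn "left" (PySem.Str.lower k)
def pHandB (k : String) : Bool :=
  PySem.Str.isIn "hand" (PySem.Str.lower k) || PySem.Str.isIn "left" (PySem.Str.lower k)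
def pFoot (k : String) : Bool :=
  PySem.Str.isIn "foot" (PySem.Str.lower k) || PySem.Str.isIn "feet" (PySem.Str.lower k) || PySem.Str.isIn "right" (PySem.Str.lower k)
def pT1 (k : String) : Bool := PySem.Str.lower k == "t1"
def pT2 (k : String) : Bool := PySem.Str.lower k == "t2"

theorem pHand_eq (k : String) : pHandA k = pHandB k := by
  unfold pHandA pHandB
  by_cases h : PySem.Str.isIn "hands" (PySem.Str.lower k) = true
  · have h1 : PySem.Str.isIn "hand" (PySem.Str.lower k) = true := by
      rw [PySem.Str.isIn_iff_infix] at h ⊢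
      exact List.IsInfix.trans (by decide) h
    rw [h, h1]; simp
  · rw [eq_false_of_ne_true h]; simp

theorem foldl_prod2 (p q : String → Bool) (keys : List String) (h f : Option String) :
    keys.foldl (fun (st : Option String × Option String) k =>
      (if p k then some k else st.1, if q k then some k else st.2)) (h, f)
    = (updLast p h keys, updLast q f keys) := by
  induction keys generalizing h f with
  | nil => rfl
  | cons k ks ih => simp only [List.foldl_cons, updLast] at *; exact ih _ _

theorem foldl_prod4 (p q r s : String → Bool) (keys : List String) (h f t1 t2 : Option String) :
    keys.foldl (fun (st : Option String × Option String × Option String × Option String) k =>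
      (if p k then some k else st.1, if q k then some k else st.2.1,
       if r k then some k else st.2.2.1, if s k then some k else st.2.2.2)) (h, f, t1, t2)
    = (updLast p h keys, updLast q f keys, updLast r t1 keys, updLast s t2 keys) := by
  induction keys generalizing h f t1 t2 with
  | nil => rfl
  | cons k ks ih => simp only [List.foldl_cons, updLast] at *; exact ih _ _ _ _

theorem aloop_eq (keys : List String) (h f : Option String) :
    keys.foldl (fun (st : Option String × Option String) k =>
      let kl := PySem.Str.lower k
      let st1 := if PySem.Str.isIn "hand" kl || PySem.Str.isIn "hands" kl || PySem.Str.isIn "left" kl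
                 then (some k, st.2) else st
      if PySem.Str.isIn "foot" kl || PySem.Str.isIn "feet" kl || PySem.Str.isIn "right" kl
      then (st1.1, some k) else st1) (h, f)
    = (updLast pHandA h keys, updLast pFoot f keys) := by
  rw [show (fun (st : Option String × Option String) k =>
      let kl := PySem.Str.lower k
      let st1 := if PySem.Str.isIn "hand" kl || PySem.Str.isIn "hands" kl || PySem.Str.isIn "left" kl
                 then (some k, st.2) else st
      if PySem.Str.isIn "foot" kl || PySem.Str.isIn "feet" kl || PySem.Str.isIn "right" kl
      then (st1.1, some k) else st1)
    = (fun (st : Option String × Option String) k =>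
      (if pHandA k then some k else st.1, if pFoot k then some k else st.2)) by
    funext st k
    unfold pHandA pFoot
    cases hb1 : (PySem.Str.isIn "hand" (PySem.Str.lower k) || PySem.Str.isIn "hands" (PySem.Str.lower k) || PySem.Str.isIn "left" (PySem.Str.lower k)) <;>
    cases hb2 : (PySem.Str.isIn "foot" (PySem.Str.lower k) || PySem.Str.isIn "feet" (PySem.Str.lower k) || PySem.Str.isIn "right" (PySem.Str.lower k)) <;>
    simp only [hb1, hb2, if_true, if_false, Bool.false_eq_true]]
  exact foldl_prod2 _ _ _ _ _

theorem bloop_eq (keys : List String) (h f t1 t2 : Option String) :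
    keys.foldl (fun (st : Option String × Option String × Option String × Option String) k =>
      let kl := PySem.Str.lower k
      let st := if PySem.Str.isIn "hand" kl || PySem.Str.isIn "left" kl
                then (some k, st.2) else st
      let st := if PySem.Str.isIn "foot" kl || PySem.Str.isIn "feet" kl || PySem.Str.isIn "right" kl
                then (st.1, some k, st.2.2) else st
      let st := if kl == "t1" then (st.1, st.2.1, some k, st.2.2.2) else st
      if kl == "t2" then (st.1, st.2.1, st.2.2.1, some k) else st)
      (h, f, t1, t2)
    = (updLast pHandB h keys, updLast pFoot f keys, updLast pT1 t1 keys, updLast pT2 t2 keys) := by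
  rw [show (fun (st : Option String × Option String × Option String × Option String) k =>
      let kl := PySem.Str.lower k
      let st := if PySem.Str.isIn "hand" kl || PySem.Str.isIn "left" kl
                then (some k, st.2) else st
      let st := if PySem.Str.isIn "foot" kl || PySem.Str.isIn "feet" kl || PySem.Str.isIn "right" kl
                then (st.1, some k, st.2.2) else st
      let st := if kl == "t1" then (st.1, st.2.1, some k, st.2.2.2) else st
      if kl == "t2" then (st.1, st.2.1, st.2.2.1, some k) else st)
    = (fun (st : Option String × Option String × Option String × Option String) k =>
      (if pHandB k then some k else st.1, if pFoot k then some k else st.2.1,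
       if pT1 k then some k else st.2.2.1, if pT2 k then some k else st.2.2.2)) by
    funext st k
    unfold pHandB pFoot pT1 pT2
    cases hb1 : (PySem.Str.isIn "hand" (PySem.Str.lower k) || PySem.Str.isIn "left" (PySem.Str.lower k)) <;>
    cases hb2 : (PySem.Str.isIn "foot" (PySem.Str.lower k) || PySem.Str.isIn "feet" (PySem.Str.lower k) || PySem.Str.isIn "right" (PySem.Str.lower k)) <;>
    cases hb3 : (PySem.Str.lower k == "t1") <;>
    cases hb4 : (PySem.Str.lower k == "t2") <;>
    simp only [hb1, hb2, hb3, hb4, if_true, if_false, Bool.false_eq_true]]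
  exact foldl_prod4 _ _ _ _ _ _ _ _ _

theorem updLast_none_of_not_mem (p : String → Bool) (keys : List String)
    (hn : ∀ k ∈ keys, p k = false) : updLast p none keys = none := by
  induction keys with
  | nil => rfl
  | cons k ks ih =>
    simp only [updLast, List.foldl_cons, hn k (by simp)]
    exact ih (fun k hk => hn k (by simp [hk]))

theorem updLast_congr (p q : String → Bool) (h : Option String) (keys : List String)
    (hpq : ∀ k, p k = q k) : updLast p h keys = updLast q h keys := by
  unfold updLast
  congr 1
  funext h k
  rw [hpq]

theorem combine_eq (p : String → Bool) (t : String) (keys : List String) :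
    (if updLast p none keys = none ∧ t ∈ keys.map (fun k => PySem.Str.lower k) then
       keys.foldl (fun h k => if PySem.Str.lower k == t then some k else h) (updLast p none keys)
     else updLast p none keys)
    = (if (updLast p none keys).isSome then updLast p none keys
       else updLast (fun k => PySem.Str.lower k == t) none keys) := by
  cases hu : updLast p none keys with
  | some v => simp
  | none =>
    simp only [Option.isSome_none, Bool.false_eq_true, if_false, true_and]
    by_cases hm : t ∈ keys.map (fun k => PySem.Str.lower k)
    · simp only [hm, if_true]
      rfl
    · simp only [hm, if_false]
      refine (updLast_none_of_not_mem _ _ ?_).symm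
      intro k hk
      simp only [beq_eq_false_iff_ne, ne_eq]
      intro he
      exact hm (List.mem_map.mpr ⟨k, hk, he⟩)

-- ===== VERDICT (by name: the statement is the Claim_ definition above) =====
theorem find_label_keys_spec : Claim_equal_find_label_keys := by
  intro map_dict _
  unfold Spec_find_label_keys find_label_keys find_label_keys_alt
  simp only [aloop_eq, bloop_eq]
  generalize (PySem.Dict.ofList map_dict).keys = keys
  rw [updLast_congr pHandA pHandB none keys pHand_eq]
  refine Prod.ext ?_ ?_
  · exact combine_eq pHandB "t1" keys
  · exact combine_eq pFoot "t2" keys
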